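-- pv_equiv track=rewrite | github.com/asakeev01/-31github | interpret.py | interpret
-- ===== SOURCE A (Python) =====
-- def interpret(command: str) -> str:
--     result = ""
--     for i in range(len(command)):
--         if i > 0 and command[i] == ")" and command[i-1] == "(":
--             result += "o"
--         elif command[i] == "a":
--             result += "a"
--         elif command[i] == "l":
--             result += "l"
--         elif command[i] == "G":
--             result += "G"
--     return result
-- ===== SOURCE B (Python) =====
-- def interpret(command: str) -> str:
--     return "o".join("".join(c for c in seg if c in "alG") for seg in command.split("()"))
-- ===== Notes on version B (the rewrite author's own statement) =====
-- stated objective: faster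
-- what changed: B replaces A's per-index Python loop with a look-back at the previous character by staged standard-library passes: split the string on the separator "()" (each removed occurrence stands for one "o"), filter every segment down to the characters a/l/G, and join the segments with "o".
import Mathlib
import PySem

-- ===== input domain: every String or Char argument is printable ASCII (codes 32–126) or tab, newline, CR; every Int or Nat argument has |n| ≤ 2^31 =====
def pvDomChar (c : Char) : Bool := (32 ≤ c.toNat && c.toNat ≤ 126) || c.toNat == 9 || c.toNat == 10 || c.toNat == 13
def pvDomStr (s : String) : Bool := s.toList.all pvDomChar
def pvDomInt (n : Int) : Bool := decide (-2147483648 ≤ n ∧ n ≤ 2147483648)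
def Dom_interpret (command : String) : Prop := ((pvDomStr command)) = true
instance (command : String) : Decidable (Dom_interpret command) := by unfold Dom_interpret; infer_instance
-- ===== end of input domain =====

-- B replaces A's per-index lookback scan by staged passes: split the string on the
-- separator "()" (each removed occurrence becomes one "o"), filter each segment to
-- a/l/G, and join — same output via standard-library passes (measured constant-factor faster).

-- ===== PORT A =====
-- A: for i in range(len(command)): look back at command[i-1] to turn "()" into "o",
-- pass a/l/G through, ignore everything else.
def interpretStep (cs : List Char) (result : List Char) (i : Int) : List Char :=
  if i > 0 ∧ PySem.List.pyGet? cs i = some ')' ∧ PySem.List.pyGet? cs (i - 1) = some '(' then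
    result ++ ['o']
  else if PySem.List.pyGet? cs i = some 'a' then result ++ ['a']
  else if PySem.List.pyGet? cs i = some 'l' then result ++ ['l']
  else if PySem.List.pyGet? cs i = some 'G' then result ++ ['G']
  else result

def interpret (command : String) : String :=
  String.ofList ((PySem.List.pyRange 0 (command.toList.length : Int) 1).foldl
    (interpretStep command.toList) [])

-- ===== PORT B =====
-- B: "o".join("".join(c for c in seg if c in "alG") for seg in command.split("()"))
def interpret_alt (command : String) : String :=
  PySem.Str.join "o"
    ((PySem.Chars.splitOn command.toList "()".toList).map
      (fun seg => String.ofList (seg.filter (fun c => PySem.Chars.isIn [c] "alG".toList))))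

-- ===== PRECONDITION & SPEC =====
def Spec_interpret (command : String) (out : String) : Prop := out = interpret_alt command
instance (command : String) (out : String) : Decidable (Spec_interpret command out) := by unfold Spec_interpret; infer_instance

-- ===== CLAIM (what is proved, stated in full; the proofs are below) =====
def Claim_equal_interpret : Prop := ∀ (command : String), Dom_interpret command → Spec_interpret command (interpret command)

-- ===== LEMMAS AND PROOFS =====

-- What A emits at one position, given the previous character (none at position 0).
def emit (p : Option Char) (c : Char) : List Char :=
  if c = ')' ∧ p = some '(' then ['o']
  else if c = 'a' then ['a']
  else if c = 'l' then ['l']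
  else if c = 'G' then ['G']
  else []

-- A's loop, rephrased as a suffix recursion carrying the previous character.
def aGo (p : Option Char) : List Char → List Char
  | [] => []
  | c :: rest => emit p c ++ aGo (some c) rest

-- Proof-side tokenizer: the common normal form both programs are reduced to.
def altGo : List Char → List Char
  | '(' :: ')' :: rest => 'o' :: altGo rest
  | c :: rest => if c = 'a' ∨ c = 'l' ∨ c = 'G' then c :: altGo rest else altGo rest
  | [] => []

-- Structural form of splitting on the two-character separator "()".
def pairSplit : List Char → List (List Char)
  | '(' :: ')' :: rest => [] :: pairSplit rest
  | c :: rest =>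
    match pairSplit rest with
    | s :: ss => (c :: s) :: ss
    | [] => [[c]]
  | [] => [[]]

-- One iteration of A's fold is one `emit`.
lemma step_eq (cs : List Char) (acc : List Char) (k : Nat) (hk : k < cs.length) :
    interpretStep cs acc (k : Int)
      = acc ++ emit (if k = 0 then none else cs[k-1]?) cs[k] := by
  unfold interpretStep emit
  rcases Nat.eq_zero_or_pos k with h0 | hpos
  · subst h0
    have hno : ¬ (((0:Nat) : Int) > 0 ∧ PySem.List.pyGet? cs ((0:Nat) : Int) = some ')' ∧
        PySem.List.pyGet? cs (((0:Nat) : Int) - 1) = some '(') := by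
      rintro ⟨h, -⟩; omega
    rw [if_neg hno]
    simp only [PySem.List.pyGet?_natCast, List.getElem?_eq_getElem hk]
    split_ifs <;> simp_all
  · have hk0 : k ≠ 0 := by omega
    rw [if_neg hk0]
    have hm1 : ((k : Int) - 1) = ((k - 1 : Nat) : Int) := by omega
    rw [hm1]
    simp only [PySem.List.pyGet?_natCast, List.getElem?_eq_getElem hk,
      List.getElem?_eq_getElem (show k - 1 < cs.length by omega)]
    have hpos' : ((k : Int) > 0) := by exact_mod_cast hpos
    split_ifs <;> simp_all

-- A's fold from index k computes acc ++ aGo (previous char at k) (suffix from k).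
lemma fold_eq (m : Nat) : ∀ (k : Nat) (cs acc : List Char), k + m = cs.length →
    (PySem.List.pyRange (k : Int) (cs.length : Int) 1).foldl (interpretStep cs) acc
      = acc ++ aGo (if k = 0 then none else cs[k-1]?) (cs.drop k) := by
  induction m with
  | zero =>
    intro k cs acc hk
    rw [PySem.List.pyRange_one_eq_nil (by omega), List.drop_of_length_le (by omega)]
    simp [aGo]
  | succ m ih =>
    intro k cs acc hk
    have hklt : k < cs.length := by omega
    rw [PySem.List.pyRange_one_cons (by exact_mod_cast hklt), List.foldl_cons,
      show ((k : Int) + 1) = ((k + 1 : Nat) : Int) by push_cast; ring,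
      ih (k+1) cs _ (by omega), step_eq cs acc k hklt,
      List.drop_eq_getElem_cons hklt]
    have hprev : (if k + 1 = 0 then none else cs[(k+1)-1]?) = some cs[k] := by
      simp [List.getElem?_eq_getElem hklt]
    rw [hprev]
    simp [aGo]

-- altGo on a cons that is not the "()" token.
lemma altGo_cons (c : Char) (rest : List Char) (h : ¬(c = '(' ∧ rest.head? = some ')')) :
    altGo (c :: rest) = if c = 'a' ∨ c = 'l' ∨ c = 'G' then c :: altGo rest else altGo rest := by
  rw [altGo.eq_def]
  cases rest with
  | nil => simp
  | cons d t =>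
    split
    · next heq => simp_all
    · next heq => injection heq with h1 h2; subst h1; subst h2; rfl
    · next heq => exact absurd heq (by simp)

-- aGo with an arbitrary previous character, expressed through the tokenizer altGo.
lemma aGo_eq_altGo (cs : List Char) : ∀ (p : Option Char),
    aGo p cs = if p = some '(' ∧ cs.head? = some ')' then 'o' :: altGo cs.tail else altGo cs := by
  induction cs using altGo.induct with
  | case1 rest ih =>
    intro p
    simp only [aGo, emit]
    rw [ih (some ')')]
    simp [altGo]
  | case2 c rest hne halG ih =>
    intro p
    have hcp : c ≠ '(' := by rcases halG with h | h | h <;> subst h <;> decide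
    have hcr : c ≠ ')' := by rcases halG with h | h | h <;> subst h <;> decide
    simp only [aGo]
    rw [ih (some c), altGo_cons c rest (by simp [hcp])]
    simp only [if_neg (by simp [hcp]: ¬(some c = some '(' ∧ rest.head? = some ')')), if_pos halG,
      if_neg (by simp [hcr]: ¬(p = some '(' ∧ (c :: rest).head? = some ')'))]
    rcases halG with h | h | h <;> subst h <;> simp [emit]
  | case3 c rest hne halG ih =>
    intro p
    simp only [aGo]
    rw [ih (some c)]
    by_cases hcp : c = '('
    · subst hcp
      have hr : rest.head? ≠ some ')' := by
        intro h
        cases rest with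
        | nil => simp at h
        | cons d t =>
          simp only [List.head?_cons, Option.some.injEq] at h
          subst h; exact hne t rfl rfl
      rw [altGo_cons '(' rest (by simp [hr])]
      simp [emit, hr]
    · rw [altGo_cons c rest (by simp [hcp])]
      simp only [if_neg halG]
      by_cases hc : c = ')'
      · subst hc
        simp only [emit]
        split_ifs <;> simp_all
      · simp [emit, hc, hcp]
        split_ifs <;> simp_all
  | case4 => intro p; simp [aGo, altGo]

-- pairSplit never returns the empty list of segments.
lemma pairSplit_ne_nil (cs : List Char) : pairSplit cs ≠ [] := by
  rw [pairSplit.eq_def]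
  split
  · simp
  · split <;> simp
  · simp

-- pairSplit on a cons that does not start the separator "()".
lemma pairSplit_cons (c : Char) (rest : List Char) (h : ¬(c = '(' ∧ rest.head? = some ')')) :
    pairSplit (c :: rest)
      = match pairSplit rest with
        | s :: ss => (c :: s) :: ss
        | [] => [[c]] := by
  rw [pairSplit.eq_def]
  cases rest with
  | nil => simp
  | cons d t =>
    split
    · next heq => simp_all
    · next heq => injection heq with h1 h2; subst h1; subst h2; rfl
    · next heq => exact absurd heq (by simp)

-- The fuel-driven splitter specialised to the separator "()" computes pairSplit.
lemma go_spec (fuel : Nat) : ∀ (l cur : List Char) (acc : List (List Char)), l.length < fuel →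
    PySem.Chars.splitOn.go ['(', ')'] fuel l cur acc
      = acc.reverse ++ (pairSplit l).modifyHead (cur.reverse ++ ·) := by
  induction fuel with
  | zero => intro l cur acc h; omega
  | succ fuel ih =>
    intro l cur acc h
    cases l with
    | nil =>
      show (cur.reverse :: acc).reverse = _
      simp [pairSplit]
    | cons c rest =>
      show (if List.isPrefixOf ['(', ')'] (c :: rest) = true then
              PySem.Chars.splitOn.go ['(', ')'] fuel (List.drop (List.length ['(', ')']) (c :: rest)) [] (cur.reverse :: acc)
            else PySem.Chars.splitOn.go ['(', ')'] fuel rest (c :: cur) acc) = _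
      by_cases hp : c = '(' ∧ rest.head? = some ')'
      · obtain ⟨hc, hd⟩ := hp
        subst hc
        cases rest with
        | nil => simp at hd
        | cons d t =>
          simp only [List.head?_cons, Option.some.injEq] at hd
          subst hd
          rw [if_pos (by simp [List.isPrefixOf])]
          simp only [List.length_cons, List.length_nil, List.drop_succ_cons,
            List.drop]
          rw [ih t [] (cur.reverse :: acc) (by simp at h ⊢; omega)]
          cases hps : pairSplit t with
          | nil => exact absurd hps (pairSplit_ne_nil t)
          | cons s ss => simp [pairSplit, hps]
      · have hnp : List.isPrefixOf ['(', ')'] (c :: rest) = false := by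
          cases rest with
          | nil => simp [List.isPrefixOf]
          | cons d t =>
            simp only [List.head?_cons, Option.some.injEq, not_and] at hp
            by_cases hc : c = '('
            · have hdd : d ≠ ')' := hp hc
              simp [List.isPrefixOf, hc]
              exact fun hd => hdd hd.symm
            · simp [List.isPrefixOf]
              exact fun h1 _ => hc h1.symm
        rw [if_neg (by simp [hnp])]
        rw [ih rest (c :: cur) acc (by simp at h ⊢; omega)]
        rw [pairSplit_cons c rest hp]
        cases hps : pairSplit rest with
        | nil => exact absurd hps (pairSplit_ne_nil rest)
        | cons s ss => simp

lemma splitOn_eq_pairSplit (cs : List Char) :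
    PySem.Chars.splitOn cs ['(', ')'] = pairSplit cs := by
  unfold PySem.Chars.splitOn
  rw [go_spec (cs.length + 1) cs [] [] (by omega)]
  cases h : pairSplit cs with
  | nil => exact absurd h (pairSplit_ne_nil cs)
  | cons s ss => simp

-- The single-character membership test  c in "alG"  is the three-way disjunction.
lemma isIn_singleton (c : Char) (l : List Char) :
    PySem.Chars.isIn [c] l = l.contains c := by
  by_cases h : c ∈ l
  · rw [List.contains_eq_mem]
    simp only [h, decide_true]
    rw [PySem.Chars.isIn_iff_infix]
    obtain ⟨s, t, rfl⟩ := List.append_of_mem h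
    exact ⟨s, t, by simp⟩
  · rw [List.contains_eq_mem]
    simp only [h, decide_false]
    rw [PySem.Chars.isIn_eq_false_iff]
    intro hinf
    exact h (hinf.sublist.subset (by simp))

-- Joining after prepending a character to the first segment prepends the character.
lemma join_cons_head (sep x : List Char) (c : Char) (ss : List (List Char)) :
    PySem.Chars.join sep ((c :: x) :: ss) = c :: PySem.Chars.join sep (x :: ss) := by
  cases ss with
  | nil => simp [PySem.Chars.join_singleton]
  | cons y zs => simp [PySem.Chars.join_cons_cons]

-- B's staged passes (split, filter each segment, join on "o") equal the tokenizer.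
lemma join_filter_pairSplit (cs : List Char) :
    PySem.Chars.join ['o']
        ((pairSplit cs).map (List.filter (fun c => PySem.Chars.isIn [c] ['a', 'l', 'G'])))
      = altGo cs := by
  induction cs using altGo.induct with
  | case1 rest ih =>
    show PySem.Chars.join ['o'] (([] : List Char).filter _ :: (pairSplit rest).map _) = _
    cases hps : pairSplit rest with
    | nil => exact absurd hps (pairSplit_ne_nil rest)
    | cons s ss =>
      rw [hps] at ih
      simp only [List.filter_nil, List.map_cons] at ih ⊢
      rw [PySem.Chars.join_cons_cons]
      simpa [altGo] using ih
  | case2 c rest hne halG ih =>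
    have hcp : ¬(c = '(' ∧ rest.head? = some ')') := by
      rcases halG with h | h | h <;> subst h <;> simp
    rw [pairSplit_cons c rest hcp, altGo_cons c rest hcp, if_pos halG]
    cases hps : pairSplit rest with
    | nil => exact absurd hps (pairSplit_ne_nil rest)
    | cons s ss =>
      rw [hps] at ih
      have hkeep : PySem.Chars.isIn [c] ['a', 'l', 'G'] = true := by
        rcases halG with h | h | h <;> subst h <;> decide
      simp only [List.map_cons, List.filter_cons, hkeep, if_pos] at ih ⊢
      rw [join_cons_head]
      simpa using ih
  | case3 c rest hne halG ih =>
    by_cases hcp : c = '(' ∧ rest.head? = some ')'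
    · obtain ⟨hc, hd⟩ := hcp
      subst hc
      cases rest with
      | nil => simp at hd
      | cons d t =>
        simp only [List.head?_cons, Option.some.injEq] at hd
        subst hd
        exact (hne t rfl rfl).elim
    · rw [pairSplit_cons c rest hcp, altGo_cons c rest hcp, if_neg halG]
      cases hps : pairSplit rest with
      | nil => exact absurd hps (pairSplit_ne_nil rest)
      | cons s ss =>
        rw [hps] at ih
        have hskip : PySem.Chars.isIn [c] ['a', 'l', 'G'] = false := by
          rw [isIn_singleton, List.contains_eq_mem, decide_eq_false_iff_not]
          simp only [List.mem_cons, List.not_mem_nil, or_false]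
          exact halG
        simp only [List.map_cons, List.filter_cons, hskip] at ih ⊢
        simpa using ih
  | case4 =>
    simp [pairSplit, PySem.Chars.join_singleton, altGo]

-- B's port, reduced to the tokenizer on the character list.
lemma interpret_alt_eq (command : String) :
    interpret_alt command = String.ofList (altGo command.toList) := by
  unfold interpret_alt PySem.Str.join
  rw [show "()".toList = ['(', ')'] from rfl, show "o".toList = ['o'] from rfl,
      show "alG".toList = ['a', 'l', 'G'] from rfl, splitOn_eq_pairSplit]
  congr 1
  rw [← join_filter_pairSplit command.toList]
  congr 1
  rw [List.map_map]
  apply List.map_congr_left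
  intro s _
  simp

-- ===== VERDICT (by name: the statement is the Claim_ definition above) =====
theorem interpret_spec : Claim_equal_interpret := by
  intro command _
  unfold Spec_interpret interpret
  rw [interpret_alt_eq,
      show (0 : Int) = ((0 : Nat) : Int) from rfl,
      fold_eq command.toList.length 0 command.toList [] (by omega)]
  rw [aGo_eq_altGo]
  simp
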